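-- pv_equiv track=rewrite | github.com/enricofer/geoprocessing_giscience_2019 | 20190414/py/esercitazione1.py | abbreviazione
-- ===== SOURCE A (Python) =====
-- import string
--
-- VOCALI = [ 'A', 'E', 'I', 'O', 'U' ]
--
-- CONSONANTI = list(set(list(string.ascii_uppercase)).difference(VOCALI))
--
-- def scomposizione(stringa):
--     '''
--     scomposizione nelle liste di consonanti e vocali che compongono la stringa in input
--     '''
--     stringa = stringa.upper().replace(' ', '')
--
--     consonanti = []
--     for car in stringa:
--         if car in CONSONANTI:
--             consonanti.append(car)
--
--     vocali = [ car for car in stringa if car in VOCALI ]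
--     return consonanti, vocali
--
-- def abbreviazione(stringa):
--     scomposizione_in_consonanti, scomposizione_in_vocali  = scomposizione(stringa)
--     sequenza = scomposizione_in_consonanti
--     while len(sequenza) < 3: #se la lunghezza è meno di 3 significa che le consonanti non bastano e servono le vocali
--         try: # pop toglie alla lista il primo elemento e lo restituisce
--             sequenza.append(scomposizione_in_vocali.pop(0))
--         except: # appende X per stringhe brevi
--             sequenza.append('X')
--     return ''.join(sequenza[:3]) # trasformazione della lista risultante in stringa
-- ===== SOURCE B (Python) =====
-- import string
--
-- VOCALI = ['A', 'E', 'I', 'O', 'U']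
--
-- def abbreviazione(stringa):
--     letters = [c for c in stringa.upper() if c in string.ascii_uppercase]
--     ordered = sorted(letters, key=lambda c: c in VOCALI)
--     return ''.join((ordered + ['X', 'X', 'X'])[:3])
-- ===== Notes on version B (the rewrite author's own statement) =====
-- stated objective: simpler
-- what changed: Replaced A's two separate accumulation loops plus the while/pop(0)/except padding assembly with a single uppercase-letter filter, one stable sort on the vowel-ness key to get consonants-then-vowels, and pad-with-XXX-then-slice-3.
import Mathlib
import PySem

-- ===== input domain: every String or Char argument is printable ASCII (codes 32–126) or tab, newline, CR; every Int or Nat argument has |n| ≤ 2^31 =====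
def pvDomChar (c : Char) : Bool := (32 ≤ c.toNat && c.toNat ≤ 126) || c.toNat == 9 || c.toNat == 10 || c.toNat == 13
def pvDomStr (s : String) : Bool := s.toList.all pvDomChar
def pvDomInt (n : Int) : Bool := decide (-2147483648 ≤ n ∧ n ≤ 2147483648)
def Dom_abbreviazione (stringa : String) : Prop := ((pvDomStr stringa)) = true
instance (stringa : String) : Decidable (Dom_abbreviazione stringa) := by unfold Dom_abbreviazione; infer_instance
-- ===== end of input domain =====

-- B replaces A's two accumulation loops and the while/pop/except padding by a single
-- filter + one stable sort on the vowel-ness key + pad-and-slice (objective: simpler).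

-- ===== PORT A =====
def pvVOCALI : List Char := ['A', 'E', 'I', 'O', 'U']

def pvASCIIUP : List Char :=
  ['A','B','C','D','E','F','G','H','I','J','K','L','M',
   'N','O','P','Q','R','S','T','U','V','W','X','Y','Z']

-- list(set(string.ascii_uppercase).difference(VOCALI)); only membership is ever used
def pvCONSONANTI : List Char := PySem.Set.diff (PySem.Set.ofList pvASCIIUP) pvVOCALI

def scomposizione (stringa : String) : List Char × List Char :=
  let s := PySem.Str.replace (PySem.Str.upper stringa) " " ""
  let consonanti := s.toList.foldl
    (fun acc car => if pvCONSONANTI.contains car then acc ++ [car] else acc) []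
  let vocali := s.toList.filter (fun car => pvVOCALI.contains car)
  (consonanti, vocali)

-- the 'while len(sequenza) < 3' loop: pop(0) from vocali, or append 'X' when it is empty
def pvWhile (sequenza vocali : List Char) : List Char :=
  if sequenza.length < 3 then
    match vocali with
    | v :: rest => pvWhile (sequenza ++ [v]) rest
    | [] => pvWhile (sequenza ++ ['X']) []
  else sequenza
termination_by 3 - sequenza.length
decreasing_by all_goals simp; omega

def abbreviazione (stringa : String) : String :=
  let sc := scomposizione stringa
  String.ofList ((pvWhile sc.1 sc.2).take 3)

-- ===== PORT B =====
def abbreviazione_alt (stringa : String) : String :=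
  let letters := (PySem.Str.upper stringa).toList.filter (fun c => pvASCIIUP.contains c)
  let ordered := PySem.List.sorted letters (fun c => pvVOCALI.contains c) false
  String.ofList ((ordered ++ ['X', 'X', 'X']).take 3)

-- ===== PRECONDITION & SPEC =====
def Spec_abbreviazione (stringa : String) (out : String) : Prop := out = abbreviazione_alt stringa
instance (stringa : String) (out : String) : Decidable (Spec_abbreviazione stringa out) := by unfold Spec_abbreviazione; infer_instance

-- ===== CLAIM (what is proved, stated in full; the proofs are below) =====
def Claim_equal_abbreviazione : Prop := ∀ (stringa : String), Dom_abbreviazione stringa → Spec_abbreviazione stringa (abbreviazione stringa)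

-- ===== LEMMAS AND PROOFS =====

-- replace(' ', '') removes exactly the spaces
lemma replace_go_space : ∀ (fuel : ℕ) (l acc : List Char), l.length ≤ fuel →
    PySem.Chars.replace.go [' '] [] fuel l acc = acc.reverse ++ l.filter (fun c => !(c == ' ')) := by
  intro fuel
  induction fuel with
  | zero =>
    intro l acc h
    have hl : l = [] := List.length_eq_zero_iff.mp (by omega)
    subst hl
    rw [PySem.Chars.replace.go]
    simp
  | succ n ih =>
    intro l acc h
    cases l with
    | nil => simp [PySem.Chars.replace.go]
    | cons c t =>
      rw [PySem.Chars.replace.go]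
      by_cases hc : c = ' '
      · subst hc
        rw [if_pos (by simp [List.isPrefixOf])]
        rw [show List.drop [' '].length (' ' :: t) = t from rfl, ih t _ (by simpa using h)]
        simp
      · have : ¬ ([' '].isPrefixOf (c :: t) = true) := by
          simp [List.isPrefixOf]; intro hh; exact (hc hh.symm).elim
        rw [if_neg this, ih t _ (by simpa using h)]
        simp [hc]

lemma replace_space (l : List Char) :
    PySem.Chars.replace l [' '] [] = l.filter (fun c => !(c == ' ')) := by
  rw [PySem.Chars.replace]
  simp [replace_go_space l.length l [] le_rfl]

-- inserting a false-key element goes right between the false block and the true block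
lemma insertBy_false (key : Char → Bool) (x : Char) (hx : key x = false) :
    ∀ (ns vs : List Char), (∀ n ∈ ns, key n = false) → (∀ v ∈ vs, key v = true) →
    PySem.List.insertBy (fun a b => decide (key a < key b)) x (ns ++ vs) = ns ++ x :: vs := by
  intro ns
  induction ns with
  | nil =>
    intro vs _ hvs
    cases vs with
    | nil => simp [PySem.List.insertBy]
    | cons v t => simp [PySem.List.insertBy, hvs v (by simp), hx]
  | cons n ns ih =>
    intro vs hns hvs
    have hn : key n = false := hns n (by simp)
    simp only [List.cons_append, PySem.List.insertBy, hx, hn]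
    simp [ih vs (fun m hm => hns m (by simp [hm])) hvs]

-- inserting a true-key element appends it at the end
lemma insertBy_true (key : Char → Bool) (x : Char) (hx : key x = true) (l : List Char) :
    PySem.List.insertBy (fun a b => decide (key a < key b)) x l = l ++ [x] := by
  apply PySem.List.insertBy_of_forall_not_before
  intro y _
  simp [hx]

-- the insertion-sort fold keeps (false-block ++ true-block) shape
lemma foldl_insertBy_split (key : Char → Bool) :
    ∀ (l ns vs : List Char), (∀ n ∈ ns, key n = false) → (∀ v ∈ vs, key v = true) →
    l.foldl (fun acc x => PySem.List.insertBy (fun a b => decide (key a < key b)) x acc) (ns ++ vs)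
      = (ns ++ l.filter (fun c => !key c)) ++ (vs ++ l.filter key) := by
  intro l
  induction l with
  | nil => intro ns vs _ _; simp
  | cons x t ih =>
    intro ns vs hns hvs
    by_cases hx : key x = true
    · rw [List.foldl_cons, insertBy_true key x hx, List.append_assoc,
        ih ns (vs ++ [x]) hns (by intro v hv; rcases List.mem_append.mp hv with h' | h'
                                  · exact hvs v h'
                                  · simp at h'; subst h'; exact hx)]
      simp [hx]
    · have hx' : key x = false := by simpa using hx
      rw [List.foldl_cons, insertBy_false key x hx' ns vs hns hvs,
        show ns ++ x :: vs = (ns ++ [x]) ++ vs by simp,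
        ih (ns ++ [x]) vs (by intro m hm; rcases List.mem_append.mp hm with h' | h'
                              · exact hns m h'
                              · simp at h'; subst h'; exact hx') hvs]
      simp [hx']

-- Python's stable sort on a Bool key = false-block ++ true-block
lemma sorted_bool_key (key : Char → Bool) (l : List Char) :
    PySem.List.sorted l key false = l.filter (fun c => !key c) ++ l.filter key := by
  have := foldl_insertBy_split key l [] [] (by simp) (by simp)
  simpa [PySem.List.sorted] using this

-- the while loop produces cons ++ vowels ++ 'X'-padding, up to take 3
lemma pvWhile_take : ∀ (n : ℕ) (s v : List Char), 3 - s.length ≤ n →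
    (pvWhile s v).take 3 = (s ++ (v ++ ['X', 'X', 'X'])).take 3 := by
  intro n
  induction n with
  | zero =>
    intro s v h
    rw [pvWhile.eq_def, if_neg (by omega)]
    rw [List.take_append_of_le_length (by omega)]
  | succ n ih =>
    intro s v h
    by_cases hs : s.length < 3
    · rw [pvWhile.eq_def, if_pos hs]
      cases v with
      | cons x r =>
        rw [ih (s ++ [x]) r (by simp; omega)]
        simp
      | nil =>
        rw [ih (s ++ ['X']) [] (by simp; omega)]
        rcases s with _ | ⟨a, _ | ⟨b, _ | ⟨c, t⟩⟩⟩ <;> simp_all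
    · rw [pvWhile.eq_def, if_neg hs]
      rw [List.take_append_of_le_length (by omega)]

lemma contains_CONS (c : Char) :
    pvCONSONANTI.contains c = (pvASCIIUP.contains c && !pvVOCALI.contains c) := by
  by_cases ha : c ∈ pvASCIIUP <;> by_cases hv : c ∈ pvVOCALI <;>
    simp [pvCONSONANTI, PySem.Set.diff, ha, hv, PySem.Set.mem_ofList]

lemma vowel_upper {c : Char} (h : pvVOCALI.contains c = true) : pvASCIIUP.contains c = true := by
  simp only [pvVOCALI, List.contains_eq_mem, decide_eq_true_eq] at h
  fin_cases h <;> decide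

lemma vowel_not_space {c : Char} (h : pvVOCALI.contains c = true) : (c == ' ') = false := by
  simp only [pvVOCALI, List.contains_eq_mem, decide_eq_true_eq] at h
  fin_cases h <;> decide

lemma az_not_space {c : Char} (h : pvASCIIUP.contains c = true) : (c == ' ') = false := by
  simp only [pvASCIIUP, List.contains_eq_mem, decide_eq_true_eq] at h
  fin_cases h <;> decide

-- ===== VERDICT (by name: the statement is the Claim_ definition above) =====
lemma filter_cons_eq (up : List Char) :
    (up.filter (fun c => !(c == ' '))).filter (fun c => pvCONSONANTI.contains c)
      = (up.filter (fun c => pvASCIIUP.contains c)).filter (fun c => !pvVOCALI.contains c) := by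
  rw [List.filter_filter, List.filter_filter]
  apply List.filter_congr
  intro c _
  rw [contains_CONS]
  by_cases haz : pvASCIIUP.contains c = true
  · simp [az_not_space haz, Bool.and_comm]
  · simp at haz; simp [haz]

lemma filter_voc_eq (up : List Char) :
    (up.filter (fun c => !(c == ' '))).filter (fun c => pvVOCALI.contains c)
      = (up.filter (fun c => pvASCIIUP.contains c)).filter (fun c => pvVOCALI.contains c) := by
  rw [List.filter_filter, List.filter_filter]
  apply List.filter_congr
  intro c _
  by_cases hv : pvVOCALI.contains c = true
  · have h2 := vowel_upper hv
    simp at hv h2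
    simp [hv, h2, vowel_not_space (by simpa using hv)]
  · simp at hv; simp [hv]

theorem abbreviazione_spec : Claim_equal_abbreviazione := by
  intro stringa _
  unfold Spec_abbreviazione abbreviazione abbreviazione_alt scomposizione
  simp only [PySem.Str.toList_replace, show (" " : String).toList = [' '] from rfl,
    show ("" : String).toList = [] from rfl, replace_space,
    PySem.List.foldl_append_if_eq_filter, List.nil_append, sorted_bool_key]
  rw [pvWhile_take 3 _ _ (by omega), ← List.append_assoc, filter_cons_eq, filter_voc_eq]
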